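-- pv_equiv track=rewrite | github.com/svezhest/itmo | 3 year/bioinf/ba6d.py | reduceNumberOfCycles
-- ===== SOURCE A (Python) =====
-- def reduceNumberOfCycles(cycles):
--     new_cycles = []
--     done = False
--     for c in cycles:
--         if not done and len(c) >= 4:
--             new_cycles.append([[c[2][0], c[0][1]], c[1]])
--             new_cycles.append([[c[0][0], c[2][1]]] + c[3:])
--             done = True
--         else:
--             new_cycles.append(c)
--     return new_cycles
-- ===== SOURCE B (Python) =====
-- def reduceNumberOfCycles(cycles):
--     if not cycles:
--         return []
--     c, *rest = cycles
--     if len(c) >= 4: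
--         e0, e1, e2, *tail = c
--         return [[[e2[0], e0[1]], e1], [[e0[0], e2[1]], *tail], *rest]
--     return [c, *reduceNumberOfCycles(rest)]
-- ===== Notes on version B (the rewrite author's own statement) =====
-- stated objective: alternative
-- what changed: Replaces A's single flag-driven accumulating loop with a structural recursion that pattern-destructures the head: a 4-element-or-longer head cycle is unpacked (e0, e1, e2, *tail) and rebuilt into the two pieces with the untouched rest appended, a short head is consed onto the recursive result; no done flag, no indexing into c and no slicing.
import Mathlib
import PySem

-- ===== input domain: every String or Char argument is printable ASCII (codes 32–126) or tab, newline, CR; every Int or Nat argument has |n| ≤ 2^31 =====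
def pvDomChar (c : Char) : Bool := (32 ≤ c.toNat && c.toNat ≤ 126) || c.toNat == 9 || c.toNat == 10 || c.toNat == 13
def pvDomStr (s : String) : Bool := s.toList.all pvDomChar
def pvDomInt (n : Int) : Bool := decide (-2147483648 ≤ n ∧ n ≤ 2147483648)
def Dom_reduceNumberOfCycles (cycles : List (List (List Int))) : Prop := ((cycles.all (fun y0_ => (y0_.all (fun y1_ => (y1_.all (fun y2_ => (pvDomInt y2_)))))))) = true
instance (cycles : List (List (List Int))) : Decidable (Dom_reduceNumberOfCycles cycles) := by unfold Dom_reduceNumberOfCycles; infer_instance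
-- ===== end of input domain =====

-- B rewrites A's flag-driven accumulating loop as a structural recursion that destructures
-- the head cycle by pattern (e0, e1, e2, *tail) instead of indexing and slicing (objective:
-- alternative). Indexing into rows (excluded by Pre_ where Python raises IndexError in both
-- programs) is ported with pyGetD defaults.

-- ===== PORT A =====
-- the for-loop of A, carrying the 'done' flag as loop state
def aLoop (done : Bool) : List (List (List Int)) → List (List (List Int))
  | [] => []
  | c :: rest =>
    if !done && decide (4 ≤ c.length) then
      [[PySem.List.pyGetD (PySem.List.pyGetD c 2 []) 0 0,
        PySem.List.pyGetD (PySem.List.pyGetD c 0 []) 1 0],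
       PySem.List.pyGetD c 1 []]
      :: ([PySem.List.pyGetD (PySem.List.pyGetD c 0 []) 0 0,
           PySem.List.pyGetD (PySem.List.pyGetD c 2 []) 1 0]
          :: PySem.List.slice c (some 3) none)
      :: aLoop true rest
    else
      c :: aLoop done rest

def reduceNumberOfCycles (cycles : List (List (List Int))) : List (List (List Int)) :=
  aLoop false cycles

-- ===== PORT B =====
-- B's recursion: the Python `len(c) >= 4` followed by `e0, e1, e2, *tail = c` is exactly
-- the four-head cons pattern (tail = t3 :: tl, since len(c) >= 4 leaves *tail nonempty).
def reduceNumberOfCycles_alt : List (List (List Int)) → List (List (List Int))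
  | [] => []
  | (e0 :: e1 :: e2 :: t3 :: tl) :: rest =>
      [[PySem.List.pyGetD e2 0 0, PySem.List.pyGetD e0 1 0], e1]
      :: ([PySem.List.pyGetD e0 0 0, PySem.List.pyGetD e2 1 0] :: t3 :: tl)
      :: rest
  | c :: rest => c :: reduceNumberOfCycles_alt rest

-- ===== PRECONDITION & SPEC =====
-- Pre_ excludes exactly the inputs where Python A (and B alike) raises IndexError: the first
-- cycle of length >= 4 (the one that gets split) must have at least two entries in its rows 0 and 2.
def Pre_reduceNumberOfCycles (cycles : List (List (List Int))) : Prop :=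
  ((cycles.find? (fun c => decide (4 ≤ c.length))).all
     (fun c => decide (2 ≤ (c.getD 0 []).length) && decide (2 ≤ (c.getD 2 []).length))) = true
instance (cycles : List (List (List Int))) : Decidable (Pre_reduceNumberOfCycles cycles) := by
  unfold Pre_reduceNumberOfCycles; infer_instance

def pvWitness_reduceNumberOfCycles : List (List (List Int)) :=
  [[[0, 1]], [[1, 2], [3, 4], [5, 6], [7, 8]], [[9, 10]]]

def Spec_reduceNumberOfCycles (cycles : List (List (List Int))) (out : List (List (List Int))) : Prop := out = reduceNumberOfCycles_alt cycles
instance (cycles : List (List (List Int))) (out : List (List (List Int))) : Decidable (Spec_reduceNumberOfCycles cycles out) := by unfold Spec_reduceNumberOfCycles; infer_instance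

-- ===== CLAIM (what is proved, stated in full; the proofs are below) =====
def Claim_equal_reduceNumberOfCycles : Prop := ∀ (cycles : List (List (List Int))), Dom_reduceNumberOfCycles cycles → Pre_reduceNumberOfCycles cycles → Spec_reduceNumberOfCycles cycles (reduceNumberOfCycles cycles)

-- ===== LEMMAS AND PROOFS =====
theorem aLoop_true (xs : List (List (List Int))) : aLoop true xs = xs := by
  induction xs with
  | nil => rfl
  | cons c rest ih => simp [aLoop, ih]

theorem a_eq_b (cycles : List (List (List Int))) :
    aLoop false cycles = reduceNumberOfCycles_alt cycles := by
  induction cycles with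
  | nil => rfl
  | cons c rest ih =>
    match c with
    | e0 :: e1 :: e2 :: t3 :: tl =>
      have hs : PySem.List.slice (e0 :: e1 :: e2 :: t3 :: tl) (some 3) none = t3 :: tl := by
        rw [show (3 : Int) = ((3 : Nat) : Int) by norm_num, PySem.List.slice_from_natCast]
        rfl
      simp [aLoop, reduceNumberOfCycles_alt, aLoop_true, PySem.List.pyGetD_ofNat', hs]
    | [] => simpa [aLoop, reduceNumberOfCycles_alt] using ih
    | [e0] => simpa [aLoop, reduceNumberOfCycles_alt] using ih
    | [e0, e1] => simpa [aLoop, reduceNumberOfCycles_alt] using ih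
    | [e0, e1, e2] => simpa [aLoop, reduceNumberOfCycles_alt] using ih

-- ===== VERDICT (by name: the statement is the Claim_ definition above) =====
theorem reduceNumberOfCycles_spec : Claim_equal_reduceNumberOfCycles := by
  intro cycles _ _
  unfold Spec_reduceNumberOfCycles reduceNumberOfCycles
  exact a_eq_b cycles
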